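-- pv_equiv track=rewrite | github.com/yashasg/ideal-spoon | scripts/301_build_stage1_dataset.py | _token_summary_by_field
-- ===== SOURCE A (Python) =====
-- from collections import Counter
-- from typing import Any, Iterable, Iterator
--
-- def _raw_token_count_for_doc(doc: dict[str, Any]) -> int:
--     return int(doc.get("raw_token_count_est") or doc.get("token_count_est") or 0)
--
-- def _token_summary_by_field(docs: list[dict], field: str) -> dict[str, dict[str, int]]:
--     rows: Counter = Counter()
--     raw_tokens: Counter = Counter()
--     clean_tokens: Counter = Counter()
--     for d in docs:
--         key = str(d.get(field) or "unknown")
--         rows[key] += 1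
--         raw_tokens[key] += _raw_token_count_for_doc(d)
--         clean_tokens[key] += int(d.get("token_count_est") or 0)
--     return {
--         key: {
--             "rows": int(rows[key]),
--             "raw_tokens_est": int(raw_tokens[key]),
--             "clean_tokens_est": int(clean_tokens[key]),
--         }
--         for key in sorted(rows)
--     }
-- ===== SOURCE B (Python) =====
-- from collections import defaultdict
-- from typing import Any
--
--
-- def _raw_token_count_for_doc(doc: dict[str, Any]) -> int:
--     return int(doc.get("raw_token_count_est") or doc.get("token_count_est") or 0)
--
--
-- def _token_summary_by_field(docs: list[dict], field: str) -> dict[str, dict[str, int]]: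
--     # group first, then reduce each group
--     groups: defaultdict = defaultdict(list)
--     for d in docs:
--         groups[str(d.get(field) or "unknown")].append(d)
--     return {
--         key: {
--             "rows": len(groups[key]),
--             "raw_tokens_est": sum(_raw_token_count_for_doc(d) for d in groups[key]),
--             "clean_tokens_est": sum(int(d.get("token_count_est") or 0) for d in groups[key]),
--         }
--         for key in sorted(groups)
--     }
-- ===== Notes on version B (the rewrite author's own statement) =====
-- stated objective: alternative
-- what changed: Replaces A's single pass accumulating three Counters with a group-first decomposition: one pass builds a defaultdict mapping each key to its list of docs, then a second pass over sorted keys reduces each group (len and two sums).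
import Mathlib
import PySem

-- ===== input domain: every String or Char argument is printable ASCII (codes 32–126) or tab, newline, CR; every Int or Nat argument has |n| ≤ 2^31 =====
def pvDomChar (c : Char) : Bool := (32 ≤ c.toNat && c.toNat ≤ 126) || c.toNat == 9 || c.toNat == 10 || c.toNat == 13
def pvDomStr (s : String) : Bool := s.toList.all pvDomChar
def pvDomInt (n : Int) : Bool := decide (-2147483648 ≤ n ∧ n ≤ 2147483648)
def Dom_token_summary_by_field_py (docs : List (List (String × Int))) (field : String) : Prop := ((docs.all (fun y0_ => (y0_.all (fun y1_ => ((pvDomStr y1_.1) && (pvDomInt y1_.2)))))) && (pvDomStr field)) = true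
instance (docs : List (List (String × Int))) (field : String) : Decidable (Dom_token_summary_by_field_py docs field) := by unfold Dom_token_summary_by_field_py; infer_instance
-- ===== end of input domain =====

-- B replaces A's three-Counter single-pass accumulation by a group-first decomposition
-- (one grouping pass into key → list-of-docs, then a reduce per group); objective: alternative, same cost.

-- shared helpers: both Pythons use the same key expression and the same helper
-- _raw_token_count_for_doc / int(d.get("token_count_est") or 0)

-- str(d.get(field) or "unknown"): falsy (absent or 0) → "unknown", else str(value)
def pvKey (field : String) (d : List (String × Int)) : String :=
  match (PySem.Dict.mk d).get? field with
  | some v => if v == 0 then "unknown" else PySem.Int.toStr v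
  | none => "unknown"

-- int(doc.get("raw_token_count_est") or doc.get("token_count_est") or 0)
def pvRaw (d : List (String × Int)) : Int :=
  let r := (PySem.Dict.mk d).getD "raw_token_count_est" 0
  if r == 0 then (PySem.Dict.mk d).getD "token_count_est" 0 else r

-- int(d.get("token_count_est") or 0)
def pvClean (d : List (String × Int)) : Int :=
  (PySem.Dict.mk d).getD "token_count_est" 0

-- ===== PORT A =====
def token_summary_by_field_py (docs : List (List (String × Int))) (field : String) : List (String × List (String × Int)) :=
  let st := docs.foldl
    (fun (st : PySem.Dict String Int × PySem.Dict String Int × PySem.Dict String Int) d =>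
      (PySem.Dict.modify st.1 (pvKey field d) 0 (· + 1),
       PySem.Dict.modify st.2.1 (pvKey field d) 0 (· + pvRaw d),
       PySem.Dict.modify st.2.2 (pvKey field d) 0 (· + pvClean d)))
    (PySem.Dict.mk [], PySem.Dict.mk [], PySem.Dict.mk [])
  (PySem.List.sorted st.1.keys id).map (fun key =>
    (key, [("rows", st.1.getD key 0),
           ("raw_tokens_est", st.2.1.getD key 0),
           ("clean_tokens_est", st.2.2.getD key 0)]))

-- ===== PORT B =====
def token_summary_by_field_py_alt (docs : List (List (String × Int))) (field : String) : List (String × List (String × Int)) :=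
  let groups := docs.foldl
    (fun (g : PySem.Dict String (List (List (String × Int)))) d =>
      PySem.Dict.modify g (pvKey field d) [] (· ++ [d]))
    (PySem.Dict.mk [])
  (PySem.List.sorted groups.keys id).map (fun key =>
    (key, [("rows", ((groups.getD key []).length : Int)),
           ("raw_tokens_est", ((groups.getD key []).map pvRaw).sum),
           ("clean_tokens_est", ((groups.getD key []).map pvClean).sum)]))

-- ===== PRECONDITION & SPEC =====
def Spec_token_summary_by_field_py (docs : List (List (String × Int))) (field : String) (out : List (String × List (String × Int))) : Prop := out = token_summary_by_field_py_alt docs field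
instance (docs : List (List (String × Int))) (field : String) (out : List (String × List (String × Int))) : Decidable (Spec_token_summary_by_field_py docs field out) := by unfold Spec_token_summary_by_field_py; infer_instance

-- ===== CLAIM (what is proved, stated in full; the proofs are below) =====
def Claim_equal_token_summary_by_field_py : Prop := ∀ (docs : List (List (String × Int))) (field : String), Dom_token_summary_by_field_py docs field → Spec_token_summary_by_field_py docs field (token_summary_by_field_py docs field)

-- ===== LEMMAS AND PROOFS =====

-- a Counter loop 'c[key x] += w x' read off: getD after the fold is the sum of w over matching elements
theorem pv_getD_foldl_modify_add {κ β : Type} [BEq κ] [LawfulBEq κ] [DecidableEq κ]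
    (l : List β) (key : β → κ) (w : β → Int) (d : PySem.Dict κ Int) (c : κ) :
    (l.foldl (fun d x => PySem.Dict.modify d (key x) 0 (· + w x)) d).getD c 0
      = d.getD c 0 + ((l.filter (fun x => key x == c)).map w).sum := by
  induction l generalizing d with
  | nil => simp
  | cons a t ih =>
    rw [List.foldl_cons, ih, PySem.Dict.getD_modify, List.filter_cons]
    by_cases h : c = key a
    · subst h; simp; ring
    · have hb : (key a == c) = false := by simp; exact fun heq => h heq.symm
      simp [h, hb]

theorem pv_getD_mk_nil {κ ν : Type} [BEq κ] (k : κ) (v : ν) :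
    (PySem.Dict.mk []).getD k v = v := rfl

theorem pv_map_congr {α β : Type} {f g : α → β} {l1 l2 : List α}
    (h : l1 = l2) (hf : ∀ a, f a = g a) : l1.map f = l2.map g := by
  subst h; exact List.map_congr_left fun a _ => hf a

theorem token_summary_eq (docs : List (List (String × Int))) (field : String) :
    token_summary_by_field_py docs field = token_summary_by_field_py_alt docs field := by
  unfold token_summary_by_field_py token_summary_by_field_py_alt
  rw [PySem.List.foldl_prod_mk
        (fun s e => PySem.Dict.modify s (pvKey field e) 0 (· + 1))
        (fun s e => (PySem.Dict.modify s.1 (pvKey field e) 0 (· + pvRaw e),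
                     PySem.Dict.modify s.2 (pvKey field e) 0 (· + pvClean e)))]
  rw [PySem.List.foldl_prod_mk
        (fun s e => PySem.Dict.modify s (pvKey field e) 0 (· + pvRaw e))
        (fun s e => PySem.Dict.modify s (pvKey field e) 0 (· + pvClean e))]
  simp only []
  refine pv_map_congr ?_ fun key => ?_
  · rw [PySem.Dict.keys_foldl_modify_key docs (pvKey field) 0,
        PySem.Dict.keys_foldl_modify_key docs (pvKey field) []]
    rfl
  have hrows : (List.foldl (fun d x => PySem.Dict.modify d (pvKey field x) 0 (· + 1)) (PySem.Dict.mk []) docs).getD key 0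
      = ((docs.filter (fun x => pvKey field x == key)).length : Int) := by
    have := pv_getD_foldl_modify_add docs (pvKey field) (fun _ => 1) (PySem.Dict.mk []) key
    simpa [pv_getD_mk_nil, List.map_const', List.sum_replicate, smul_eq_mul] using this
  have hraw : (List.foldl (fun d x => PySem.Dict.modify d (pvKey field x) 0 (· + pvRaw x)) (PySem.Dict.mk []) docs).getD key 0
      = ((docs.filter (fun x => pvKey field x == key)).map pvRaw).sum := by
    simpa [pv_getD_mk_nil] using pv_getD_foldl_modify_add docs (pvKey field) pvRaw (PySem.Dict.mk []) key
  have hclean : (List.foldl (fun d x => PySem.Dict.modify d (pvKey field x) 0 (· + pvClean x)) (PySem.Dict.mk []) docs).getD key 0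
      = ((docs.filter (fun x => pvKey field x == key)).map pvClean).sum := by
    simpa [pv_getD_mk_nil] using pv_getD_foldl_modify_add docs (pvKey field) pvClean (PySem.Dict.mk []) key
  have hgroup : (List.foldl (fun g d => PySem.Dict.modify g (pvKey field d) [] (· ++ [d])) (PySem.Dict.mk []) docs).getD key []
      = docs.filter (fun x => pvKey field x == key) := by
    have h := PySem.Dict.getD_foldl_modify_append (docs.map (fun d => (pvKey field d, d))) (PySem.Dict.mk []) key
    rw [List.foldl_map] at h
    simpa [List.filter_map, Function.comp_def, pv_getD_mk_nil] using h
  simp [hrows, hraw, hclean, hgroup]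

-- ===== VERDICT (by name: the statement is the Claim_ definition above) =====
theorem token_summary_by_field_py_spec : Claim_equal_token_summary_by_field_py := by
  intro docs field _
  unfold Spec_token_summary_by_field_py
  exact token_summary_eq docs field
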